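-- pv_equiv track=rewrite | github.com/VincentMarquez/Bubbles-Network. | bubbles_overseer.py | _validate_plan_coverage
-- ===== SOURCE A (Python) =====
-- from typing import Dict, Any, Optional, List, Tuple, Callable
--
-- def _validate_plan_coverage(plan: str, root_causes: List[str]) -> bool:
--     """Check if plan addresses all identified root causes"""
--     plan_lower = plan.lower()
--
--     coverage_keywords = {
--         "import": ["import", "module", "dependency"],
--         "error": ["error", "exception", "try", "except", "handle"],
--         "validation": ["validate", "check", "verify", "ensure"],
--         "performance": ["optimize", "efficient", "cache", "limit"],
--         "syntax": ["syntax", "format", "structure", "parse"]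
--     }
--
--     for cause in root_causes:
--         cause_lower = cause.lower()
--         covered = False
--
--         # Check for relevant keywords
--         for category, keywords in coverage_keywords.items():
--             if any(kw in cause_lower for kw in keywords):
--                 if any(kw in plan_lower for kw in keywords):
--                     covered = True
--                     break
--
--         if not covered:
--             return False
--
--     return True
-- ===== SOURCE B (Python) =====
-- from typing import List
--
-- # Bitmask reformulation: each category gets one bit; a string's mask is the OR
-- # of the bits of every keyword it contains. A cause is covered iff its mask
-- # shares a bit with the plan's mask.
-- _KW_BITS = [
--     ("import", 1), ("module", 1), ("dependency", 1),
--     ("error", 2), ("exception", 2), ("try", 2), ("except", 2), ("handle", 2),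
--     ("validate", 4), ("check", 4), ("verify", 4), ("ensure", 4),
--     ("optimize", 8), ("efficient", 8), ("cache", 8), ("limit", 8),
--     ("syntax", 16), ("format", 16), ("structure", 16), ("parse", 16),
-- ]
--
--
-- def _keyword_mask(text: str) -> int:
--     t = text.lower()
--     m = 0
--     for kw, bit in _KW_BITS:
--         if kw in t:
--             m |= bit
--     return m
--
--
-- def _validate_plan_coverage(plan: str, root_causes: List[str]) -> bool:
--     """Check if plan addresses all identified root causes"""
--     plan_mask = _keyword_mask(plan)
--     for cause in root_causes:
--         if _keyword_mask(cause) & plan_mask == 0: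
--             return False
--     return True
-- ===== Notes on version B (the rewrite author's own statement) =====
-- stated objective: alternative
-- what changed: B replaces A's per-cause scan of the category dict (any-cause-keyword then any-plan-keyword with break/flag) by a bitmask encoding: each category is a bit, a string's mask is the OR of bits of keywords it contains, and a cause is covered iff mask(cause) & mask(plan) != 0, with the plan mask computed once.
import Mathlib
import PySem

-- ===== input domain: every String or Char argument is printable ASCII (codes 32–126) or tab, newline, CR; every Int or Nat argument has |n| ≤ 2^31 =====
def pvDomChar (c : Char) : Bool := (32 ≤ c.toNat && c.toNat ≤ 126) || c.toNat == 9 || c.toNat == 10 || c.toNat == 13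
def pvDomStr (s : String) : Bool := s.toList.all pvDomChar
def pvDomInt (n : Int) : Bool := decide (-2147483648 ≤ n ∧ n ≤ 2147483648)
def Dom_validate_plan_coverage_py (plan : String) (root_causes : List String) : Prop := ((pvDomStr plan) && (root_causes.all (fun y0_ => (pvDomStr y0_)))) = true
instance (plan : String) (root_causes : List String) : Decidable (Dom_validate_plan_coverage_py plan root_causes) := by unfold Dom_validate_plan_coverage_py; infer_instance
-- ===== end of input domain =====

-- B recasts coverage as bit arithmetic: each category is one bit, a string's mask
-- ORs the bits of the keywords it contains, and a cause is covered iff its mask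
-- shares a bit with the plan's mask (objective: alternative algorithm).

-- ===== PORT A =====
-- the coverage_keywords dict, in insertion order
def pvCoverageKeywords : List (String × List String) :=
  [("import", ["import", "module", "dependency"]),
   ("error", ["error", "exception", "try", "except", "handle"]),
   ("validation", ["validate", "check", "verify", "ensure"]),
   ("performance", ["optimize", "efficient", "cache", "limit"]),
   ("syntax", ["syntax", "format", "structure", "parse"])]

-- A's inner 'for category, keywords' loop with the covered flag and break
def pvAInner (plan_lower cause_lower : String) : List (String × List String) → Bool
  | [] => false
  | (_, kws) :: rest =>
    if kws.any (fun kw => PySem.Str.isIn kw cause_lower) then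
      if kws.any (fun kw => PySem.Str.isIn kw plan_lower) then true
      else pvAInner plan_lower cause_lower rest
    else pvAInner plan_lower cause_lower rest

-- A's outer 'for cause in root_causes' loop with the early 'return False'
def pvAOuter (plan_lower : String) : List String → Bool
  | [] => true
  | cause :: rest =>
    if pvAInner plan_lower (PySem.Str.lower cause) pvCoverageKeywords then
      pvAOuter plan_lower rest
    else false

def validate_plan_coverage_py (plan : String) (root_causes : List String) : Bool :=
  pvAOuter (PySem.Str.lower plan) root_causes

-- ===== PORT B =====
-- the flat (keyword, category-bit) table _KW_BITS
def pvKwBits : List (String × Nat) :=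
  [("import", 1), ("module", 1), ("dependency", 1),
   ("error", 2), ("exception", 2), ("try", 2), ("except", 2), ("handle", 2),
   ("validate", 4), ("check", 4), ("verify", 4), ("ensure", 4),
   ("optimize", 8), ("efficient", 8), ("cache", 8), ("limit", 8),
   ("syntax", 16), ("format", 16), ("structure", 16), ("parse", 16)]

-- _keyword_mask: the 'm |= bit' loop over _KW_BITS
def pvKeywordMask (text : String) : Nat :=
  let t := PySem.Str.lower text
  pvKwBits.foldl (fun m p => if PySem.Str.isIn p.1 t then m ||| p.2 else m) 0

-- B's 'for cause in root_causes' loop with the early 'return False'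
def pvBLoop (plan_mask : Nat) : List String → Bool
  | [] => true
  | cause :: rest =>
    if pvKeywordMask cause &&& plan_mask == 0 then false
    else pvBLoop plan_mask rest

def validate_plan_coverage_py_alt (plan : String) (root_causes : List String) : Bool :=
  pvBLoop (pvKeywordMask plan) root_causes

-- ===== PRECONDITION & SPEC =====
def Spec_validate_plan_coverage_py (plan : String) (root_causes : List String) (out : Bool) : Prop := out = validate_plan_coverage_py_alt plan root_causes
instance (plan : String) (root_causes : List String) (out : Bool) : Decidable (Spec_validate_plan_coverage_py plan root_causes out) := by unfold Spec_validate_plan_coverage_py; infer_instance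

-- ===== CLAIM (what is proved, stated in full; the proofs are below) =====
def Claim_equal_validate_plan_coverage_py : Prop := ∀ (plan : String) (root_causes : List String), Dom_validate_plan_coverage_py plan root_causes → Spec_validate_plan_coverage_py plan root_causes (validate_plan_coverage_py plan root_causes)

-- ===== LEMMAS AND PROOFS =====

-- does string t contain some keyword of the list kws
def pvCat (kws : List String) (t : String) : Bool :=
  kws.any (fun kw => PySem.Str.isIn kw t)

-- the mask-fold step function
def pvStep (t : String) (m : Nat) (p : String × Nat) : Nat :=
  if PySem.Str.isIn p.1 t then m ||| p.2 else m

-- one category group of the fold: all keywords carry the same bit b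
theorem pvGroupFold (t : String) (kws : List String) (b m : Nat) :
    (kws.map (fun k => (k, b))).foldl (pvStep t) m
      = if pvCat kws t then m ||| b else m := by
  induction kws generalizing m with
  | nil => rfl
  | cons k rest ih =>
    simp only [List.map, List.foldl, pvStep]
    by_cases h : PySem.Str.isIn k t = true
    · have hk : pvCat (k :: rest) t = true := by
        simp only [PySem.Str.isIn] at h; simp [pvCat, h]
      rw [if_pos h, ih, hk, if_pos rfl]
      split
      · rw [Nat.or_assoc, Nat.or_self]
      · rfl
    · have hk : pvCat (k :: rest) t = pvCat rest t := by
        simp only [PySem.Str.isIn] at h; simp [pvCat, h]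
      rw [if_neg h, ih, hk]

-- combine five flags into the mask the fold produces
def pvBits (b1 b2 b3 b4 b5 : Bool) : Nat :=
  (if b5 then ((if b4 then ((if b3 then ((if b2 then ((if b1 then (0 ||| 1) else 0) ||| 2) else (if b1 then (0 ||| 1) else 0)) ||| 4) else (if b2 then ((if b1 then (0 ||| 1) else 0) ||| 2) else (if b1 then (0 ||| 1) else 0))) ||| 8) else (if b3 then ((if b2 then ((if b1 then (0 ||| 1) else 0) ||| 2) else (if b1 then (0 ||| 1) else 0)) ||| 4) else (if b2 then ((if b1 then (0 ||| 1) else 0) ||| 2) else (if b1 then (0 ||| 1) else 0)))) ||| 16)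
   else (if b4 then ((if b3 then ((if b2 then ((if b1 then (0 ||| 1) else 0) ||| 2) else (if b1 then (0 ||| 1) else 0)) ||| 4) else (if b2 then ((if b1 then (0 ||| 1) else 0) ||| 2) else (if b1 then (0 ||| 1) else 0))) ||| 8) else (if b3 then ((if b2 then ((if b1 then (0 ||| 1) else 0) ||| 2) else (if b1 then (0 ||| 1) else 0)) ||| 4) else (if b2 then ((if b1 then (0 ||| 1) else 0) ||| 2) else (if b1 then (0 ||| 1) else 0)))))

def pvK1 : List String := ["import", "module", "dependency"]
def pvK2 : List String := ["error", "exception", "try", "except", "handle"]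
def pvK3 : List String := ["validate", "check", "verify", "ensure"]
def pvK4 : List String := ["optimize", "efficient", "cache", "limit"]
def pvK5 : List String := ["syntax", "format", "structure", "parse"]

theorem pvKwBits_grouped :
    pvKwBits = (pvK1.map (fun k => (k, 1))) ++ (pvK2.map (fun k => (k, 2)))
      ++ (pvK3.map (fun k => (k, 4))) ++ (pvK4.map (fun k => (k, 8)))
      ++ (pvK5.map (fun k => (k, 16))) := by decide

-- the mask equals the five-flag combination
theorem pvMask_eq (text : String) :
    pvKeywordMask text
      = pvBits (pvCat pvK1 (PySem.Str.lower text)) (pvCat pvK2 (PySem.Str.lower text))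
          (pvCat pvK3 (PySem.Str.lower text)) (pvCat pvK4 (PySem.Str.lower text))
          (pvCat pvK5 (PySem.Str.lower text)) := by
  show pvKwBits.foldl (pvStep (PySem.Str.lower text)) 0 = _
  rw [pvKwBits_grouped]
  simp only [List.foldl_append, pvGroupFold]
  unfold pvBits
  split <;> split <;> split <;> split <;> split <;> rfl

-- the bit test equals the per-category coupled condition
theorem pvLand_eq (a1 a2 a3 a4 a5 c1 c2 c3 c4 c5 : Bool) :
    (!(pvBits a1 a2 a3 a4 a5 &&& pvBits c1 c2 c3 c4 c5 == 0))
      = ((a1 && c1) || (a2 && c2) || (a3 && c3) || (a4 && c4) || (a5 && c5)) := by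
  revert a1 a2 a3 a4 a5 c1 c2 c3 c4 c5; decide

-- A's inner loop is the 'any' of (cause-match && plan-match) over the table
theorem pvAInner_eq_any (pl cl : String) (l : List (String × List String)) :
    pvAInner pl cl l =
      l.any (fun p => (p.2.any (fun kw => PySem.Str.isIn kw cl)) &&
                      (p.2.any (fun kw => PySem.Str.isIn kw pl))) := by
  induction l with
  | nil => rfl
  | cons h t ih =>
    obtain ⟨cat, kws⟩ := h
    by_cases hc : ∃ x ∈ kws, PySem.Chars.isIn x.toList cl.toList = true <;>
      by_cases hp : ∃ x ∈ kws, PySem.Chars.isIn x.toList pl.toList = true <;>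
      simp [pvAInner, ih, hc, hp]

-- per-cause agreement: A's inner loop equals B's bit test
theorem pvPerCause (plan cause : String) :
    pvAInner (PySem.Str.lower plan) (PySem.Str.lower cause) pvCoverageKeywords
      = !(pvKeywordMask cause &&& pvKeywordMask plan == 0) := by
  rw [pvAInner_eq_any, pvMask_eq, pvMask_eq, pvLand_eq]
  simp [pvCoverageKeywords, pvCat, pvK1, pvK2, pvK3, pvK4, pvK5]
  ac_rfl

theorem pvOuter_eq (plan : String) (l : List String) :
    pvAOuter (PySem.Str.lower plan) l = pvBLoop (pvKeywordMask plan) l := by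
  induction l with
  | nil => rfl
  | cons c t ih =>
    simp only [pvAOuter, pvBLoop, pvPerCause, ih]
    cases h : pvKeywordMask c &&& pvKeywordMask plan == 0 <;> simp

-- ===== VERDICT =====
theorem validate_plan_coverage_py_spec : Claim_equal_validate_plan_coverage_py := by
  intro plan root_causes _
  show validate_plan_coverage_py plan root_causes = validate_plan_coverage_py_alt plan root_causes
  exact pvOuter_eq plan root_causes
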